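-- pv_equiv track=rewrite | github.com/sjin09/himut | scripts/seq2msa2ccs.py | msa2ccs_bq
-- ===== SOURCE A (Python) =====
-- from collections import defaultdict
--
-- def msa2ccs_bq(msa_lst):
--
--
--     ccs_msa = msa_lst[0]
--     idx2base2count = {i: defaultdict(lambda: 0) for i in range(len(ccs_msa))}
--     for subread in msa_lst[1:]: # subreads
--         for i, subread_base in enumerate(subread):
--             idx2base2count[i][subread_base] += 1
--
--     ccs_bq_lst = []
--     subread_count = len(msa_lst[1:])
--     for i, j in enumerate(ccs_msa):
--         if j == "-":
--             ccs_bq_lst.append("-")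
--             continue
--         subread_base_count = idx2base2count[i][j]
--         if subread_count == subread_base_count:
--             ccs_bq_lst.append("~")
--         else:
--             ccs_bq_lst.append("!")
--     ccs_bq = "".join(ccs_bq_lst).replace("-", "")
--     return ccs_bq
-- ===== SOURCE B (Python) =====
-- def msa2ccs_bq(msa_lst):
--     ccs, subreads = msa_lst[0], msa_lst[1:]
--     return "".join(
--         "~" if all(i < len(s) and s[i] == b for s in subreads) else "!"
--         for i, b in enumerate(ccs)
--         if b != "-"
--     )
-- ===== Notes on version B (the rewrite author's own statement) =====
-- stated objective: simpler
-- what changed: B drops A's two-pass defaultdict count table (build per-column base counts, then re-read them) and instead does one column-wise scan over enumerate(ccs), emitting '~' when all subreads agree at that column and '!' otherwise, skipping '-' columns directly instead of appending '-' and replacing it away.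
-- crash fix: A raises IndexError on an empty list and KeyError when a subread is longer than the CCS row; on the latter (nonempty list, some subread longer than the first row) B returns the quality string treating out-of-range positions as disagreement, e.g. '!' on ['a','bc']. — e.g. on msa2ccs_bq(["a", "bc"]): A raises KeyError, B returns "!"
import Mathlib
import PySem

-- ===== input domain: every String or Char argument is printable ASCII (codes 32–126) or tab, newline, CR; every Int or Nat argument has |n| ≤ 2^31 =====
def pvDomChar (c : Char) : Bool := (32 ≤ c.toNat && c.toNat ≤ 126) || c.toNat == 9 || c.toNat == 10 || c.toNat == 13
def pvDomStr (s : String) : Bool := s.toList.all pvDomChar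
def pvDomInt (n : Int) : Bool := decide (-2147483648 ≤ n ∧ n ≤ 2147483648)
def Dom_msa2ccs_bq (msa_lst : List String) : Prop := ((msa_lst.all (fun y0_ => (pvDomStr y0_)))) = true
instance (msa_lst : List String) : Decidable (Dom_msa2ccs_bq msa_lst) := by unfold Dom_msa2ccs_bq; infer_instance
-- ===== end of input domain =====

-- B replaces A's two-pass defaultdict count table with a single column-wise scan
-- checking unanimous subread agreement directly (objective: simpler).

-- ===== PORT A =====
-- idx2base2count[i][subread_base] += 1  (KeyError when i is not a key — outside Pre_; the 'none' branch leaves the dict unchanged)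
def pvAStep (t : PySem.Dict Int (PySem.Dict Char Int)) (p : Int × Char) : PySem.Dict Int (PySem.Dict Char Int) :=
  match t.get? p.1 with
  | some inner => t.insert p.1 (inner.insert p.2 (inner.getD p.2 0 + 1))
  | none => t

-- {i: defaultdict(lambda: 0) for i in range(len(ccs_msa))}
def pvInitTable (n : Nat) : PySem.Dict Int (PySem.Dict Char Int) :=
  (PySem.List.pyRange 0 (n : Int) 1).foldl
    (fun d i => d.insert i (PySem.Dict.empty : PySem.Dict Char Int)) PySem.Dict.empty

-- the nested counting loop over the subreads
def pvCountTable (subreads : List String) (n : Nat) : PySem.Dict Int (PySem.Dict Char Int) :=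
  subreads.foldl (fun t s => (PySem.List.enumerate s.toList).foldl pvAStep t) (pvInitTable n)

def msa2ccs_bq (msa_lst : List String) : String :=
  match msa_lst with
  | [] => ""  -- Python: msa_lst[0] raises IndexError; excluded by Pre_
  | ccs_msa :: subreads =>
    let table := pvCountTable subreads ccs_msa.toList.length
    let subread_count : Int := subreads.length
    let ccs_bq_lst := (PySem.List.enumerate ccs_msa.toList).foldl
      (fun acc p =>
        if p.2 = '-' then acc ++ ['-']
        else
          let subread_base_count := (table.getD p.1 PySem.Dict.empty).getD p.2 0
          if subread_count = subread_base_count then acc ++ ['~'] else acc ++ ['!'])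
      []
    PySem.Str.replace (String.ofList ccs_bq_lst) "-" ""

-- ===== PORT B =====
def msa2ccs_bq_alt (msa_lst : List String) : String :=
  match msa_lst with
  | [] => ""  -- Python: msa_lst[0] raises IndexError; excluded by Pre_
  | ccs :: subreads =>
    String.ofList
      (((PySem.List.enumerate ccs.toList).filter (fun p => p.2 ≠ '-')).map
        (fun p =>
          if subreads.all (fun s =>
              decide (p.1 < (s.toList.length : Int)) &&
              (PySem.List.pyGet? s.toList p.1 == some p.2))
          then '~' else '!'))

-- ===== PRECONDITION & SPEC =====
-- Pre_ excludes exactly the inputs where A raises: the empty list (IndexError at msa_lst[0])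
-- and lists where some subread is longer than the first row (KeyError in the count table).
def Pre_msa2ccs_bq (msa_lst : List String) : Prop :=
  msa_lst ≠ [] ∧ ∀ s ∈ msa_lst.tail, s.toList.length ≤ (msa_lst.headD "").toList.length
instance (msa_lst : List String) : Decidable (Pre_msa2ccs_bq msa_lst) := by
  unfold Pre_msa2ccs_bq; infer_instance
def pvWitness_msa2ccs_bq : List String := ["AC-GT", "AC-GT", "ACGG-"]

-- A raises KeyError when some subread is strictly longer than the CCS row; B returns the
-- quality string treating out-of-range positions as disagreement.
def Raises_msa2ccs_bq (msa_lst : List String) : Prop :=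
  msa_lst ≠ [] ∧ ∃ s ∈ msa_lst.tail, (msa_lst.headD "").toList.length < s.toList.length
instance (msa_lst : List String) : Decidable (Raises_msa2ccs_bq msa_lst) := by
  unfold Raises_msa2ccs_bq; infer_instance
def pvRaiseWitness_msa2ccs_bq : List String := ["a", "bc"]
def pvRaiseWitnessOut_msa2ccs_bq : String := "!"

def Spec_msa2ccs_bq (msa_lst : List String) (out : String) : Prop := out = msa2ccs_bq_alt msa_lst
instance (msa_lst : List String) (out : String) : Decidable (Spec_msa2ccs_bq msa_lst out) := by
  unfold Spec_msa2ccs_bq; infer_instance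

-- ===== CLAIM (what is proved, stated in full; the proofs are below) =====
def Claim_equal_msa2ccs_bq : Prop := ∀ (msa_lst : List String), Dom_msa2ccs_bq msa_lst → Pre_msa2ccs_bq msa_lst → Spec_msa2ccs_bq msa_lst (msa2ccs_bq msa_lst)
def Claim_raises_msa2ccs_bq : Prop := (∀ (msa_lst : List String), Dom_msa2ccs_bq msa_lst → Raises_msa2ccs_bq msa_lst → ¬ Pre_msa2ccs_bq msa_lst) ∧ (Dom_msa2ccs_bq (pvRaiseWitness_msa2ccs_bq) ∧ Raises_msa2ccs_bq (pvRaiseWitness_msa2ccs_bq) ∧ msa2ccs_bq_alt (pvRaiseWitness_msa2ccs_bq) = pvRaiseWitnessOut_msa2ccs_bq)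

-- ===== LEMMAS AND PROOFS =====

-- pvAStep never adds or removes keys
lemma pvAStep_contains (t : PySem.Dict Int (PySem.Dict Char Int)) (p : Int × Char) (j : Int) :
    (pvAStep t p).contains j = t.contains j := by
  unfold pvAStep
  cases h : t.get? p.1 with
  | none => rfl
  | some inner =>
    rw [PySem.Dict.contains_insert]
    by_cases hj : j = p.1
    · subst hj
      simp [PySem.Dict.contains_eq_isSome_get?, h]
    · simp [hj]

lemma pvAStep_foldl_contains (l : List (Int × Char)) (t : PySem.Dict Int (PySem.Dict Char Int)) (j : Int) :
    (l.foldl pvAStep t).contains j = t.contains j := by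
  induction l generalizing t with
  | nil => rfl
  | cons p l ih => simp [List.foldl, ih, pvAStep_contains]

-- one subread's inner fold adds, per (column, base), that pair's count — when the column key exists
lemma pvAStep_foldl_getD (l : List (Int × Char)) (t : PySem.Dict Int (PySem.Dict Char Int)) (i : Int) (c : Char) :
    ((l.foldl pvAStep t).getD i PySem.Dict.empty).getD c 0
      = (t.getD i PySem.Dict.empty).getD c 0
        + (if t.contains i then (l.count (i, c) : Int) else 0) := by
  induction l generalizing t with
  | nil => simp
  | cons p l ih =>
    simp only [List.foldl]
    rw [ih]
    have hcont : (pvAStep t p).contains i = t.contains i := pvAStep_contains t p i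
    rw [hcont]
    by_cases hci : t.contains i
    · simp only [hci, if_true]
      have : ((pvAStep t p).getD i PySem.Dict.empty).getD c 0
          = (t.getD i PySem.Dict.empty).getD c 0 + (if p = (i, c) then 1 else 0) := by
        unfold pvAStep
        cases h : t.get? p.1 with
        | none => simp only []
                  by_cases hp : p = (i, c)
                  · subst hp
                    rw [PySem.Dict.contains_eq_isSome_get?, h] at hci; simp at hci
                  · simp [hp]
        | some inner =>
          simp only []
          by_cases hj : i = p.1
          · subst hj
            rw [PySem.Dict.getD_insert_self, PySem.Dict.getD_of_get?_eq_some _ _ h]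
            by_cases hc2 : c = p.2
            · subst hc2; rw [PySem.Dict.getD_insert_self]
              simp
            · rw [PySem.Dict.getD_insert_of_ne _ _ _ hc2]
              have hp : ¬ p = (p.1, c) := fun hp => hc2 (congrArg Prod.snd hp).symm
              simp [hp]
          · rw [PySem.Dict.getD_insert_of_ne _ _ _ hj]
            have hp : ¬ p = (i, c) := fun hp => hj (congrArg Prod.fst hp).symm
            simp [hp]
      rw [this]
      rw [List.count_cons]
      push_cast
      by_cases hp : p = (i, c) <;> simp [hp] <;> ring
    · simp only [hci]
      have : (pvAStep t p).getD i PySem.Dict.empty = t.getD i PySem.Dict.empty := by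
        unfold pvAStep
        cases h : t.get? p.1 with
        | none => rfl
        | some inner =>
          simp only []
          by_cases hj : i = p.1
          · subst hj
            rw [PySem.Dict.contains_eq_isSome_get?, h] at hci; simp at hci
          · rw [PySem.Dict.getD_insert_of_ne _ _ _ hj]
      rw [this]
      simp

-- the count of (i, c) in an enumerate list is 1 or 0 according to the character at i
lemma count_enumerate (xs : List Char) (i : Int) (c : Char) (hi : 0 ≤ i) :
    ((PySem.List.enumerate xs).count (i, c) : Int)
      = (if PySem.List.pyGet? xs i = some c then 1 else 0) := by
  have hnd : (PySem.List.enumerate xs).Nodup :=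
    (PySem.List.pairwise_lt_enumerate xs 0).imp (fun h => by
      intro he; rw [he] at h; exact lt_irrefl _ h)
  rw [List.Nodup.count hnd]
  have key : (i, c) ∈ PySem.List.enumerate xs ↔ PySem.List.pyGet? xs i = some c := by
    rw [PySem.List.mem_enumerate_iff, PySem.List.pyGet?_of_nonneg xs hi]
    constructor
    · rintro ⟨k, hk, hp⟩
      simp only [Prod.ext_iff] at hp
      obtain ⟨h1, h2⟩ := hp
      have hik : i.toNat = k := by omega
      rw [hik, List.getElem?_eq_getElem hk, h2]
    · intro hg
      have hlt : i.toNat < xs.length := by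
        by_contra hge
        rw [List.getElem?_eq_none (by omega)] at hg
        simp at hg
      rw [List.getElem?_eq_getElem hlt, Option.some_inj] at hg
      exact ⟨i.toNat, hlt, by rw [← hg]; simp; omega⟩
  simp only [key]
  split <;> simp

-- outer fold over the subreads accumulates the per-column agreement count
lemma table_getD (subs : List String) (t : PySem.Dict Int (PySem.Dict Char Int)) (i : Int) (c : Char)
    (hi : 0 ≤ i) (hc : t.contains i = true) :
    ((subs.foldl (fun t s => (PySem.List.enumerate s.toList).foldl pvAStep t) t).getD i PySem.Dict.empty).getD c 0
      = (t.getD i PySem.Dict.empty).getD c 0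
        + (subs.countP (fun s => PySem.List.pyGet? s.toList i == some c) : Int) := by
  induction subs generalizing t with
  | nil => simp
  | cons s subs ih =>
    simp only [List.foldl]
    rw [ih _ (by rw [pvAStep_foldl_contains, hc])]
    rw [pvAStep_foldl_getD, hc, if_pos rfl, count_enumerate _ _ _ hi]
    rw [List.countP_cons]
    by_cases hp : PySem.List.pyGet? s.toList i = some c
    · simp [hp]; ring
    · simp [hp]

lemma contains_foldl_insert_empty (l : List Int) (d : PySem.Dict Int (PySem.Dict Char Int)) (i : Int) :
    ((l.foldl (fun d j => d.insert j (PySem.Dict.empty : PySem.Dict Char Int)) d).contains i)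
      = (d.contains i || decide (i ∈ l)) := by
  induction l generalizing d with
  | nil => simp
  | cons j l ih =>
    simp only [List.foldl]
    rw [ih, PySem.Dict.contains_insert]
    by_cases hj : i = j <;> simp [hj, Bool.or_assoc]

lemma init_contains (n : Nat) (i : Int) :
    (pvInitTable n).contains i = decide (0 ≤ i ∧ i < (n : Int)) := by
  rw [pvInitTable, contains_foldl_insert_empty]
  simp [PySem.List.mem_pyRange_one]

lemma insert_empty_foldl_getD (l : List Int) (d : PySem.Dict Int (PySem.Dict Char Int)) (i : Int)
    (h : d.getD i PySem.Dict.empty = PySem.Dict.empty) :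
    (l.foldl (fun d j => d.insert j (PySem.Dict.empty : PySem.Dict Char Int)) d).getD i PySem.Dict.empty
      = PySem.Dict.empty := by
  induction l generalizing d with
  | nil => exact h
  | cons j l ih =>
    simp only [List.foldl]
    exact ih _ (by rw [PySem.Dict.getD_insert]; split <;> simp [h])

-- the count table read off at an in-range column is the number of agreeing subreads
lemma cnt_eq (ccs : String) (subs : List String) (i : Int) (c : Char)
    (h0 : 0 ≤ i) (hn : i < (ccs.toList.length : Int)) :
    ((pvCountTable subs ccs.toList.length).getD i PySem.Dict.empty).getD c 0
      = (subs.countP (fun s => PySem.List.pyGet? s.toList i == some c) : Int) := by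
  rw [pvCountTable, table_getD subs _ i c h0 (by rw [init_contains]; exact decide_eq_true ⟨h0, by exact_mod_cast hn⟩)]
  rw [pvInitTable, insert_empty_foldl_getD _ _ i (by simp)]
  simp

-- replacing "-" by "" is filtering out '-'
lemma replace_go_dash (l : List Char) : ∀ (fuel : Nat) (acc : List Char), l.length ≤ fuel →
    PySem.Chars.replace.go ['-'] [] fuel l acc = acc.reverse ++ l.filter (fun c => c ≠ '-') := by
  induction l with
  | nil =>
    intro fuel acc _
    cases fuel <;> simp [PySem.Chars.replace.go]
  | cons c t ih =>
    intro fuel acc hf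
    cases fuel with
    | zero => simp at hf
    | succ fuel =>
      rw [PySem.Chars.replace.go]
      by_cases hc : c = '-'
      · subst hc
        simp only [List.isPrefixOf, BEq.rfl, Bool.true_and, if_pos,
          List.drop_succ_cons, List.drop_zero, List.reverse_nil, List.nil_append, List.length]
        rw [ih fuel acc (by simpa using hf)]
        simp
      · have hpre : (['-'].isPrefixOf (c :: t)) = false := by
          simp [List.isPrefixOf]
          intro h; exact absurd h.symm hc
        rw [hpre]
        simp only [Bool.false_eq_true, if_false]
        rw [ih fuel (c :: acc) (by simpa using hf)]
        simp [hc]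

lemma replace_dash (l : List Char) :
    PySem.Chars.replace l ['-'] [] = l.filter (fun c => c ≠ '-') := by
  rw [PySem.Chars.replace]
  simp [replace_go_dash l l.length [] le_rfl]

-- the per-column character A emits
def pvColA (ccs : String) (subs : List String) (p : Int × Char) : Char :=
  if p.2 = '-' then '-'
  else if (subs.length : Int) = ((pvCountTable subs ccs.toList.length).getD p.1 PySem.Dict.empty).getD p.2 0
  then '~' else '!'

-- B's per-subread test agrees with A's per-subread count predicate at a nonnegative column
lemma predB_eq (s : String) (i : Int) (c : Char) (h0 : 0 ≤ i) :
    (decide (i < (s.toList.length : Int)) && (PySem.List.pyGet? s.toList i == some c))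
      = (PySem.List.pyGet? s.toList i == some c) := by
  cases hg : (PySem.List.pyGet? s.toList i == some c) with
  | false => simp
  | true =>
    rw [beq_iff_eq] at hg
    rw [PySem.List.pyGet?_of_nonneg s.toList h0] at hg
    have : i.toNat < s.toList.length := by
      by_contra hge
      rw [List.getElem?_eq_none (by omega)] at hg
      simp at hg
    simp only [Bool.and_true]
    exact decide_eq_true (by omega)

lemma main_cons (ccs : String) (subs : List String) :
    msa2ccs_bq (ccs :: subs) = msa2ccs_bq_alt (ccs :: subs) := by
  simp only [msa2ccs_bq, msa2ccs_bq_alt]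
  rw [show (fun acc (p : Int × Char) =>
        if p.2 = '-' then acc ++ ['-']
        else
          if (subs.length : Int)
              = ((pvCountTable subs ccs.toList.length).getD p.1 PySem.Dict.empty).getD p.2 0
          then acc ++ ['~'] else acc ++ ['!'])
      = fun acc p => acc ++ [pvColA ccs subs p] from funext fun acc => funext fun p => by
        simp only [pvColA]; split_ifs <;> rfl]
  rw [PySem.List.foldl_append_singleton_eq_map]
  rw [← String.toList_inj]
  rw [PySem.Str.toList_replace]
  have h1 : ("-" : String).toList = ['-'] := rfl
  have h2 : ("" : String).toList = [] := rfl
  rw [h1, h2, String.toList_ofList, String.toList_ofList, List.nil_append, replace_dash]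
  rw [List.filter_map]
  rw [List.filter_congr (q := fun p : Int × Char => p.2 ≠ '-') (fun p _ => by
    simp only [Function.comp, pvColA]
    split_ifs with hd hcnt <;> simp [hd])]
  apply List.map_congr_left
  intro p hp
  rw [List.mem_filter] at hp
  obtain ⟨hmem, hnd⟩ := hp
  rw [PySem.List.mem_enumerate_iff] at hmem
  obtain ⟨k, hk, hpk⟩ := hmem
  have h0 : 0 ≤ p.1 := by rw [hpk]; simp
  have hn : p.1 < (ccs.toList.length : Int) := by rw [hpk]; show (0:Int) + (k:Int) < _; omega
  simp only [pvColA]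
  rw [if_neg (by simpa using hnd)]
  rw [cnt_eq ccs subs p.1 p.2 h0 hn]
  have hiff : ((subs.length : Int) = (subs.countP (fun s => PySem.List.pyGet? s.toList p.1 == some p.2) : Int))
      ↔ (subs.all (fun s =>
            decide (p.1 < (s.toList.length : Int)) &&
            (PySem.List.pyGet? s.toList p.1 == some p.2)) = true) := by
    rw [List.all_eq_true]
    constructor
    · intro h s hs
      rw [predB_eq s p.1 p.2 h0]
      exact (List.countP_eq_length.mp (by exact_mod_cast h.symm)) s hs
    · intro h
      have : (subs.countP (fun s => PySem.List.pyGet? s.toList p.1 == some p.2)) = subs.length :=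
        List.countP_eq_length.mpr (fun s hs => by
          rw [← predB_eq s p.1 p.2 h0]; exact h s hs)
      exact_mod_cast this.symm
  exact if_congr hiff rfl rfl

-- ===== VERDICT (by name: the statement is the Claim_ definition above) =====
theorem msa2ccs_bq_spec : Claim_equal_msa2ccs_bq := by
  intro msa _ hpre
  obtain ⟨hne, -⟩ := hpre
  unfold Spec_msa2ccs_bq
  match msa with
  | [] => exact absurd rfl hne
  | ccs :: subs => exact main_cons ccs subs

@[simp] theorem msa2ccs_bq_raises : Claim_raises_msa2ccs_bq := by
  unfold Claim_raises_msa2ccs_bq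
  constructor
  · rintro msa _ ⟨hne, s, hs, hlt⟩ ⟨_, hall⟩
    exact absurd (hall s hs) (by omega)
  · exact ⟨by decide, by decide, by decide⟩
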